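-- pv_equiv track=rewrite | github.com/rendanirA/Level-0-coding-challenges | task_0.9.py | find_vowels
-- ===== SOURCE A (Python) =====
-- def find_vowels(string1):
--     res = ""
--     for char in string1:
--         if char in "aeiouAEIOU":
--             res = res + char
--     else:
--         x = ",".join(sorted(set(res), key=res.index))
--     return x
-- ===== SOURCE B (Python) =====
-- def find_vowels(string1):
--     vowels = "aeiouAEIOU"
--     seen = set()
--     result = []
--     for char in string1:
--         if char in vowels and char not in seen:
--             seen.add(char)
--             result.append(char)
--     return ",".join(result)
-- ===== Notes on version B (the rewrite author's own statement) =====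
-- stated objective: simpler
-- what changed: One forward pass with a seen-set and result list replaces A's build-all-vowels string followed by sorted(set(res), key=res.index) post-processing.
import Mathlib
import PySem

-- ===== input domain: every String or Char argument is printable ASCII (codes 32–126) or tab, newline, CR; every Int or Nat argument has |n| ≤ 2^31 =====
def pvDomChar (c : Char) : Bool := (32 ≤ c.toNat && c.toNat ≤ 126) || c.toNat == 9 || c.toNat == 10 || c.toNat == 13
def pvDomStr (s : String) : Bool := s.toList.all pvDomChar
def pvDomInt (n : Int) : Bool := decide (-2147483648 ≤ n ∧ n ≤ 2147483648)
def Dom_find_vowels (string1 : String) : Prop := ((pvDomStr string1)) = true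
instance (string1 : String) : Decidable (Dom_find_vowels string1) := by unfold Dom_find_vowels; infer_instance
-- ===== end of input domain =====

-- B replaces A's collect-then-sorted(set(res), key=res.index) post-processing by a single
-- forward pass keeping a seen-set and a result list (objective: simpler).

-- ===== PORT A =====
def find_vowels (string1 : String) : String :=
  let res : List Char :=
    string1.toList.foldl
      (fun res char => if "aeiouAEIOU".toList.contains char then res ++ [char] else res) []
  -- sorted(set(res), key=res.index): the key res.index is injective on set(res), so the
  -- set's hash order cannot influence the stable sort's output.  '.getD 0' is a totality
  -- guard only: every element of set(res) occurs in res, so res.index never raises here.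
  let x := PySem.Str.join ","
    ((PySem.List.sorted (PySem.Set.ofList res)
        (fun c => (PySem.List.index? res c).getD 0) false).map (fun c => String.ofList [c]))
  x

-- ===== PORT B =====
def find_vowels_alt (string1 : String) : String :=
  let p := string1.toList.foldl
    (fun (p : PySem.Set Char × List Char) char =>
      if "aeiouAEIOU".toList.contains char && !(PySem.Set.contains p.1 char) then
        (PySem.Set.add p.1 char, p.2 ++ [char])
      else p)
    (PySem.Set.empty, [])
  PySem.Str.join "," (p.2.map (fun c => String.ofList [c]))

-- ===== PRECONDITION & SPEC =====
def Spec_find_vowels (string1 : String) (out : String) : Prop := out = find_vowels_alt string1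
instance (string1 : String) (out : String) : Decidable (Spec_find_vowels string1 out) := by unfold Spec_find_vowels; infer_instance

-- ===== CLAIM (what is proved, stated in full; the proofs are below) =====
def Claim_equal_find_vowels : Prop := ∀ (string1 : String), Dom_find_vowels string1 → Spec_find_vowels string1 (find_vowels string1)

-- ===== LEMMAS AND PROOFS =====

-- the first-occurrence index of a member is below the length
lemma idx_getD_lt_length {a : Char} {xs : List Char} (h : a ∈ xs) :
    (PySem.List.index? xs a).getD 0 < xs.length := by
  cases h' : PySem.List.index? xs a with
  | none => exact absurd h ((PySem.List.index?_eq_none_iff xs a).mp h')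
  | some k =>
    rw [PySem.List.index?_eq_some_iff] at h'
    obtain ⟨pre, suf, hxs, hlen, -⟩ := h'
    subst hxs
    simp [← hlen]

-- set(res) as PySem lists it (first occurrences in order) has strictly increasing res.index keys
lemma pairwise_idx (xs : List Char) :
    (PySem.Set.ofList xs).Pairwise
      (fun a b => (PySem.List.index? xs a).getD 0 < (PySem.List.index? xs b).getD 0) := by
  induction xs using List.reverseRecOn with
  | nil => simp [PySem.Set.ofList]
  | append_singleton l x ih =>
    rw [PySem.Set.ofList_append_singleton]
    have htrans : ∀ {a b : Char}, a ∈ PySem.Set.ofList l → b ∈ PySem.Set.ofList l →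
        (PySem.List.index? l a).getD 0 < (PySem.List.index? l b).getD 0 →
        (PySem.List.index? (l ++ [x]) a).getD 0 < (PySem.List.index? (l ++ [x]) b).getD 0 := by
      intro a b ha hb hab
      rw [PySem.List.index?_append_of_mem _ ((PySem.Set.mem_ofList l a).mp ha),
          PySem.List.index?_append_of_mem _ ((PySem.Set.mem_ofList l b).mp hb)]
      exact hab
    by_cases hx : x ∈ PySem.Set.ofList l
    · have hxl : x ∈ l := (PySem.Set.mem_ofList l x).mp hx
      have hadd : (PySem.Set.ofList l).add x = PySem.Set.ofList l := by
        simp [PySem.Set.add, PySem.Set.mem_ofList, hxl]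
      rw [hadd]
      exact ih.imp_of_mem htrans
    · have hxl : x ∉ l := fun hm => hx ((PySem.Set.mem_ofList l x).mpr hm)
      have hadd : (PySem.Set.ofList l).add x = PySem.Set.ofList l ++ [x] := by
        simp [PySem.Set.add, PySem.Set.mem_ofList, hxl]
      rw [hadd, List.pairwise_append]
      refine ⟨ih.imp_of_mem htrans, List.pairwise_singleton _ _, ?_⟩
      intro a ha b hb
      rcases List.mem_singleton.mp hb with rfl
      rw [PySem.List.index?_append_of_mem _ ((PySem.Set.mem_ofList l a).mp ha),
          PySem.List.index?_append_singleton_self l b hxl]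
      simpa using idx_getD_lt_length ((PySem.Set.mem_ofList l a).mp ha)

-- A's sorted(set(res), key=res.index) is set(res)'s own (first-occurrence) order
lemma sorted_ofList_idx (xs : List Char) :
    PySem.List.sorted (PySem.Set.ofList xs)
      (fun c => (PySem.List.index? xs c).getD 0) false = PySem.Set.ofList xs := by
  exact PySem.List.sorted_eq_self_of_pairwise _ _ ((pairwise_idx xs).imp Nat.le_of_lt)

-- B's loop keeps seen = result; together they compute set(vowels of the input)
lemma foldB (l : List Char) (s : List Char) :
    l.foldl
      (fun (p : PySem.Set Char × List Char) char =>
        if "aeiouAEIOU".toList.contains char && !(PySem.Set.contains p.1 char) then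
          (PySem.Set.add p.1 char, p.2 ++ [char])
        else p) (s, s)
    = (PySem.Set.update s (l.filter (fun c => "aeiouAEIOU".toList.contains c)),
       PySem.Set.update s (l.filter (fun c => "aeiouAEIOU".toList.contains c))) := by
  induction l generalizing s with
  | nil => simp [PySem.Set.update_nil]
  | cons c l ih =>
    simp only [List.foldl_cons, List.filter_cons]
    by_cases hv : "aeiouAEIOU".toList.contains c = true
    · by_cases hc : PySem.Set.contains s c = true
      · have hcm : c ∈ s := (PySem.Set.contains_iff s c).mp hc
        have hadd : PySem.Set.add s c = s := by simp [PySem.Set.add, hcm]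
        simp only [hv, hc, Bool.not_true, Bool.and_false, if_pos, PySem.Set.update_cons, hadd]
        exact ih s
      · have hc' : PySem.Set.contains s c = false := by
          cases h : PySem.Set.contains s c
          · rfl
          · exact absurd h hc
        have hcm : c ∉ s := fun hm => hc ((PySem.Set.contains_iff s c).mpr hm)
        have hadd : PySem.Set.add s c = s ++ [c] := by simp [PySem.Set.add, hcm]
        simp only [hv, hc', Bool.not_false, Bool.and_true, reduceIte,
          PySem.Set.update_cons, hadd]
        exact ih (s ++ [c])
    · have hv' : "aeiouAEIOU".toList.contains c = false := by
        cases h : "aeiouAEIOU".toList.contains c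
        · rfl
        · exact absurd h hv
      simp only [hv', Bool.false_and, Bool.false_eq_true, if_false]

      exact ih s

-- A's collecting loop is a filter
lemma resA (l : List Char) :
    l.foldl (fun res char => if "aeiouAEIOU".toList.contains char then res ++ [char] else res) []
    = l.filter (fun c => "aeiouAEIOU".toList.contains c) := by
  simpa using PySem.List.foldl_append_if_eq_filter (fun c => "aeiouAEIOU".toList.contains c) l []

-- ===== VERDICT (by name: the statement is the Claim_ definition above) =====
theorem find_vowels_spec : Claim_equal_find_vowels := by
  intro string1 _
  unfold Spec_find_vowels find_vowels find_vowels_alt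
  rw [show (PySem.Set.empty : PySem.Set Char) = ([] : List Char) from rfl]
  rw [foldB string1.toList []]
  simp only [resA, PySem.Set.update_nil_left, sorted_ofList_idx]
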